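-- pv_equiv track=rewrite | github.com/Menamonmon/holoforge | sim/test_tm_choice.py | get_expected
-- ===== SOURCE A (Python) =====
-- def get_expected(data_in):
--     if not (0 <= data_in <= 255):
--         raise ValueError("Input must be an integer between 0 and 255.")
--
--     # Extract the LSB and calculate the sum of 1's in the byte
--     lsb = data_in & 1
--     sum_ones = bin(data_in).count("1")
--
--     # Initialize the output as the LSB
--     output_value = lsb
--
--     # Determine which option to use
--     if sum_ones > 4 or (sum_ones == 4 and lsb == 0):
--         # Option Two: XNOR operation
--         for i in range(1, 8):
--             bit1 = (data_in >> i) & 1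
--             bit2 = (data_in >> (7 - i)) & 1
--             output_value = (output_value << 1) | int(not (bit1 ^ bit2))  # XNOR
--         output_value = (output_value << 1) | 0  # Append 0 for option two
--     else:
--         # Option One: XOR operation
--         for i in range(1, 8):
--             bit1 = (data_in >> i) & 1
--             bit2 = (data_in >> (7 - i)) & 1
--             output_value = (output_value << 1) | (bit1 ^ bit2)  # XOR
--         output_value = (output_value << 1) | 1  # Append 1 for option one
--
--     return output_value
-- ===== SOURCE B (Python) =====
-- def get_expected(data_in):
--     if not (0 <= data_in <= 255):
--         raise ValueError("Input must be an integer between 0 and 255.")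
--
--     lsb = data_in & 1
--     sum_ones = bin(data_in).count("1")
--
--     # bit-reverse the byte; then bit i of (data_in ^ rev) is b_i ^ b_{7-i}
--     rev = int('{:08b}'.format(data_in)[::-1], 2)
--     middle = (data_in ^ rev) & 0x7F
--
--     if sum_ones > 4 or (sum_ones == 4 and lsb == 0):
--         middle ^= 0x7F  # XNOR variant
--         flag = 0
--     else:
--         flag = 1
--     return (lsb << 8) | (middle << 1) | flag
-- ===== Notes on version B (the rewrite author's own statement) =====
-- stated objective: simpler
-- what changed: Replaces both explicit 7-iteration bit loops with a closed-form bit-reversal: middle = (data_in ^ reverse8(data_in)) & 0x7F (XNOR case flips with ^ 0x7F), assembled as (lsb<<8)|(middle<<1)|flag.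
import Mathlib
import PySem

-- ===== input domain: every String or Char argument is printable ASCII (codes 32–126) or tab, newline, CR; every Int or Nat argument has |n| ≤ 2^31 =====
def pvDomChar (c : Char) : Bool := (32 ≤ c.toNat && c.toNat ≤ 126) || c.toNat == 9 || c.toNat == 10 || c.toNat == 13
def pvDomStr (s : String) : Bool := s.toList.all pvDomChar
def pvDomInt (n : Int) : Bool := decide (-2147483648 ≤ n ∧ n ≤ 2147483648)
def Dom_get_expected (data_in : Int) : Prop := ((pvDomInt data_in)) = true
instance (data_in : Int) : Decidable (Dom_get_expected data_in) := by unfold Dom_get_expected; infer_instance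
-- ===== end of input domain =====

-- B replaces A's two explicit 7-iteration bit loops with a closed-form bit-reversal
-- formula middle = (data_in ^ rev8(data_in)) & 0x7F (objective: simpler).


-- ===== PORT A =====
-- bin(n).count("1") for 0 ≤ n (exact on the nonnegative domain admitted by Pre_)
def pvPopcountAux : Nat → Nat → Nat
  | 0, _ => 0
  | fuel+1, n => if n = 0 then 0 else n % 2 + pvPopcountAux fuel (n / 2)
-- 32 bits of fuel suffice for every n with n < 2^32 (the Dom bound); fuel only makes the recursion structural
def pvPopcount (n : Nat) : Nat := pvPopcountAux 32 n

def get_expected (data_in : Int) : Int :=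
  let n := data_in.toNat
  let lsb := n % 2
  let sum_ones := pvPopcount n
  let output_value := lsb
  if sum_ones > 4 ∨ (sum_ones = 4 ∧ lsb = 0) then
    -- Option Two: XNOR; for i in range(1,8)
    let out := (List.range' 1 7).foldl
      (fun acc i => acc * 2 + (1 - (((n >>> i) % 2) ^^^ ((n >>> (7 - i)) % 2)))) output_value
    Int.ofNat (out * 2 + 0)
  else
    -- Option One: XOR; for i in range(1,8)
    let out := (List.range' 1 7).foldl
      (fun acc i => acc * 2 + (((n >>> i) % 2) ^^^ ((n >>> (7 - i)) % 2))) output_value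
    Int.ofNat (out * 2 + 1)

-- ===== PORT B =====
def get_expected_alt (data_in : Int) : Int :=
  let n := data_in.toNat
  let lsb := n % 2
  let sum_ones := pvPopcount n
  -- int('{:08b}'.format(n)[::-1], 2): parse the reversed 8-bit string, bit 0 first
  let rev := (List.range 8).foldl (fun acc i => acc * 2 + ((n >>> i) % 2)) 0
  let middle := (n ^^^ rev) &&& 0x7F
  if sum_ones > 4 ∨ (sum_ones = 4 ∧ lsb = 0) then
    Int.ofNat ((lsb <<< 8) ||| ((middle ^^^ 0x7F) <<< 1) ||| 0)
  else
    Int.ofNat ((lsb <<< 8) ||| (middle <<< 1) ||| 1)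

-- ===== PRECONDITION & SPEC =====
-- A raises ValueError outside 0..255
def Pre_get_expected (data_in : Int) : Prop := 0 ≤ data_in ∧ data_in ≤ 255
instance (data_in : Int) : Decidable (Pre_get_expected data_in) := by unfold Pre_get_expected; infer_instance
def pvWitness_get_expected : Int := (170)

def Spec_get_expected (data_in : Int) (out : Int) : Prop := out = get_expected_alt data_in
instance (data_in : Int) (out : Int) : Decidable (Spec_get_expected data_in out) := by unfold Spec_get_expected; infer_instance

-- ===== CLAIM (what is proved, stated in full; the proofs are below) =====
def Claim_equal_get_expected : Prop := ∀ (data_in : Int), Dom_get_expected data_in → Pre_get_expected data_in → Spec_get_expected data_in (get_expected data_in)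

-- ===== LEMMAS AND PROOFS =====
set_option maxRecDepth 10000 in
theorem get_expected_key : ∀ n : Nat, n < 256 →
    get_expected (Int.ofNat n) = get_expected_alt (Int.ofNat n) := by decide

-- ===== VERDICT (by name: the statement is the Claim_ definition above) =====
theorem get_expected_spec : Claim_equal_get_expected := by
  intro d _ hpre
  unfold Spec_get_expected
  obtain ⟨h0, h255⟩ := hpre
  have hd : d = Int.ofNat d.toNat := (Int.toNat_of_nonneg h0).symm
  rw [hd]
  exact get_expected_key d.toNat (by omega)
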